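-- pv_equiv track=rewrite | github.com/RangelGasharov/Python_Basics | algorithms/edabit_calculated_bonus.py | bonus
-- ===== SOURCE A (Python) =====
-- def bonus(days):
--     sum_bonus = 0
--     boundaries = [48, 40, 32]
--     bonus_reward = [600, 550, 325]
--
--     for i in range(0, len(boundaries)):
--         if days > boundaries[i]:
--             sum_bonus += (days - boundaries[i]) * bonus_reward[i]
--             days -= days - boundaries[i]
--
--     return sum_bonus
-- ===== SOURCE B (Python) =====
-- def bonus(days):
--     if days > 48:
--         return (days - 48) * 600 + 4400 + 2600
--     elif days > 40:
--         return (days - 40) * 550 + 2600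
--     elif days > 32:
--         return (days - 32) * 325
--     else:
--         return 0
-- ===== Notes on version B (the rewrite author's own statement) =====
-- stated objective: simpler
-- what changed: Replaces the loop over parallel boundary/reward lists with a mutating days accumulator by a direct piecewise closed form with precomputed band totals (8*550=4400, 8*325=2600).
import Mathlib
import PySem

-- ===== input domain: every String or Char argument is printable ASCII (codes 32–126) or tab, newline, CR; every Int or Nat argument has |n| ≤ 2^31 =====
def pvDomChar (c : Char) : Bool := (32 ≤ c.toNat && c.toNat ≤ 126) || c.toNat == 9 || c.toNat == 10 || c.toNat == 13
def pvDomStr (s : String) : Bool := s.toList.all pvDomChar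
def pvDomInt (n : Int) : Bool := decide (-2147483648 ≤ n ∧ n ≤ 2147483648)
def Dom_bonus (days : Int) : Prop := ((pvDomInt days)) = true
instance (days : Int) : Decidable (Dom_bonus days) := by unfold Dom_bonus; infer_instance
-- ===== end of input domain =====

-- B replaces A's loop (mutating accumulator over parallel boundary/reward lists) by a piecewise closed form; objective: simpler.

-- ===== PORT A =====
-- loop over zipped (boundary, reward) pairs, carrying (days, sum_bonus) as state
def bonus (days : Int) : Int :=
  let st := (List.zip [48, 40, 32] [600, 550, 325]).foldl
    (fun (s : Int × Int) (br : Int × Int) =>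
      if s.1 > br.1 then (s.1 - (s.1 - br.1), s.2 + (s.1 - br.1) * br.2) else s)
    (days, 0)
  st.2

-- ===== PORT B =====
def bonus_alt (days : Int) : Int :=
  if days > 48 then (days - 48) * 600 + 4400 + 2600
  else if days > 40 then (days - 40) * 550 + 2600
  else if days > 32 then (days - 32) * 325
  else 0

-- ===== PRECONDITION & SPEC =====
def Spec_bonus (days : Int) (out : Int) : Prop := out = bonus_alt days
instance (days : Int) (out : Int) : Decidable (Spec_bonus days out) := by unfold Spec_bonus; infer_instance

-- ===== CLAIM =====
def Claim_equal_bonus : Prop := ∀ (days : Int), Dom_bonus days → Spec_bonus days (bonus days)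

-- ===== LEMMAS AND PROOFS =====

-- ===== VERDICT =====
theorem bonus_spec : Claim_equal_bonus := by
  intro days _
  unfold Spec_bonus bonus bonus_alt
  simp [List.zip, List.foldl]
  split_ifs <;> omega
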